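-- pv_equiv track=rewrite | github.com/yiwei79/AZOTH | scripts/roadmap_scaffold.py | _normalize_blocked_by
-- ===== SOURCE A (Python) =====
-- def _normalize_blocked_by(values: list[str] | None) -> list[str]:
--     blocked: list[str] = []
--     for raw in values or []:
--         for token in raw.split(","):
--             token = token.strip()
--             if token and token not in blocked:
--                 blocked.append(token)
--     return blocked
-- ===== SOURCE B (Python) =====
-- def _normalize_blocked_by(values):
--     tokens = [t for raw in (values or []) for s in raw.split(',') if (t := s.strip())]
--     out = []
--     while tokens:
--         head = tokens[0]
--         out.append(head)
--         tokens = [t for t in tokens[1:] if t != head]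
--     return out
-- ===== Notes on version B (the rewrite author's own statement) =====
-- stated objective: alternative
-- what changed: Two staged passes instead of one interleaved loop: first flatten/split/strip into the full token list, then dedup by repeated head-selection and partition (take the first token, filter out all its later copies, repeat) with no membership test or seen-structure at all.
import Mathlib
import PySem

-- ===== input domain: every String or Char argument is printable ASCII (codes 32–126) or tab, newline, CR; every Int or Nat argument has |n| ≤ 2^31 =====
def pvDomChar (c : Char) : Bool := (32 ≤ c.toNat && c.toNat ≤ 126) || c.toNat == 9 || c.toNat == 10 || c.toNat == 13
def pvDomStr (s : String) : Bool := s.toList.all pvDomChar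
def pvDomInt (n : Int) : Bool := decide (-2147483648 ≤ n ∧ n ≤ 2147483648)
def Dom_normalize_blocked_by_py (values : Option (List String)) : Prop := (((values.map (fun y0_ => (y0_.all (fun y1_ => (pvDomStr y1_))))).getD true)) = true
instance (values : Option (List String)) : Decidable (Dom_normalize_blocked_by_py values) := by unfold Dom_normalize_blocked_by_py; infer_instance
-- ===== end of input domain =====

-- B stages the work: flatten/split/strip into the full token list first, then dedup by
-- repeated head-selection and partition (no membership test); A interleaves splitting,
-- stripping and a membership-guarded append in one nested loop.

-- ===== PORT A =====
def normalize_blocked_by_py (values : Option (List String)) : List String :=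
  (values.getD []).foldl
    (fun blocked raw =>
      ((PySem.Str.split? raw ",").getD []).foldl
        (fun blocked token0 =>
          let token := PySem.Str.strip token0
          if token ≠ "" ∧ token ∉ blocked then blocked ++ [token] else blocked)
        blocked)
    []

-- ===== PORT B =====
-- the while loop of Source B: take the head, drop all its later copies, repeat
def nbbDedupLoop (tokens : List String) : List String :=
  match tokens with
  | [] => []
  | head :: rest => head :: nbbDedupLoop (rest.filter (fun t => t ≠ head))
termination_by tokens.length
decreasing_by
  simpa using Nat.lt_succ_of_le ((List.length_filter_le _ _).trans (by simp))

def normalize_blocked_by_py_alt (values : Option (List String)) : List String :=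
  nbbDedupLoop
    (((values.getD []).flatMap (fun raw => (PySem.Str.split? raw ",").getD [])).filterMap
      (fun s => let t := PySem.Str.strip s; if t = "" then none else some t))

-- ===== PRECONDITION & SPEC =====
def Spec_normalize_blocked_by_py (values : Option (List String)) (out : List String) : Prop := out = normalize_blocked_by_py_alt values
instance (values : Option (List String)) (out : List String) : Decidable (Spec_normalize_blocked_by_py values out) := by unfold Spec_normalize_blocked_by_py; infer_instance

-- ===== CLAIM (what is proved, stated in full; the proofs are below) =====
def Claim_equal_normalize_blocked_by_py : Prop := ∀ (values : Option (List String)), Dom_normalize_blocked_by_py values → Spec_normalize_blocked_by_py values (normalize_blocked_by_py values)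

-- ===== LEMMAS AND PROOFS =====

-- A's guarded append over one raw string's pieces = Set.add folded over B's tokens of that string.
theorem nbb_inner (l : List String) (b : List String) :
    l.foldl
      (fun blocked token0 =>
        let token := PySem.Str.strip token0
        if token ≠ "" ∧ token ∉ blocked then blocked ++ [token] else blocked) b
    = (l.filterMap (fun s => let t := PySem.Str.strip s; if t = "" then none else some t)).foldl
        PySem.Set.add b := by
  induction l generalizing b with
  | nil => rfl
  | cons s l ih =>
    simp only [List.foldl_cons, List.filterMap_cons]
    by_cases h : PySem.Str.strip s = ""
    · simp [h, ih]
    · by_cases hm : PySem.Str.strip s ∈ b <;>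
        simp [h, hm, PySem.Set.add, PySem.Set.contains, ih]

-- The outer loop over all raw strings = Set.add folded over the full token list.
theorem nbb_outer (vals : List String) (b : List String) :
    vals.foldl
      (fun blocked raw =>
        ((PySem.Str.split? raw ",").getD []).foldl
          (fun blocked token0 =>
            let token := PySem.Str.strip token0
            if token ≠ "" ∧ token ∉ blocked then blocked ++ [token] else blocked)
          blocked) b
    = ((vals.flatMap (fun raw => (PySem.Str.split? raw ",").getD [])).filterMap
        (fun s => let t := PySem.Str.strip s; if t = "" then none else some t)).foldl
        PySem.Set.add b := by
  induction vals generalizing b with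
  | nil => rfl
  | cons raw vals ih =>
    simp only [List.foldl_cons, List.flatMap_cons, List.filterMap_append, List.foldl_append]
    rw [nbb_inner, ih]

-- equation lemmas for the well-founded nbbDedupLoop
theorem nbbDedupLoop_nil : nbbDedupLoop [] = [] := by
  rw [nbbDedupLoop.eq_def]

theorem nbbDedupLoop_cons (h : String) (t : List String) :
    nbbDedupLoop (h :: t) = h :: nbbDedupLoop (t.filter (fun x => x ≠ h)) := by
  rw [nbbDedupLoop.eq_def]

-- Folding Set.add (first-occurrence dedup with a membership guard) equals B's
-- head-selection/partition loop on the tokens not already in the accumulator.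
theorem nbb_fold_eq_loop (tokens : List String) (b : List String) :
    tokens.foldl PySem.Set.add b
      = b ++ nbbDedupLoop (tokens.filter (fun t => t ∉ b)) := by
  induction tokens generalizing b with
  | nil => simp [nbbDedupLoop_nil]
  | cons h t ih =>
    by_cases hm : h ∈ b
    · have hadd : PySem.Set.add b h = b := by
        simp [PySem.Set.add, PySem.Set.contains, hm]
      simp only [List.foldl_cons, hadd, List.filter_cons]
      rw [ih b]
      simp [hm]
    · have hadd : PySem.Set.add b h = b ++ [h] := by
        simp [PySem.Set.add, PySem.Set.contains, hm]
      simp only [List.foldl_cons, hadd, List.filter_cons]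
      rw [ih (b ++ [h])]
      have hfilter : t.filter (fun x => decide (x ∉ b ++ [h]))
          = (t.filter (fun x => decide (x ∉ b))).filter (fun x => x ≠ h) := by
        rw [List.filter_filter]
        apply List.filter_congr
        intro x _
        by_cases hx : x ∈ b <;> by_cases hxh : x = h <;> simp [hx, hxh]
      rw [hfilter]
      simp [hm, nbbDedupLoop_cons]

-- ===== VERDICT (by name: the statement is the Claim_ definition above) =====
theorem normalize_blocked_by_py_spec : Claim_equal_normalize_blocked_by_py := by
  intro values _
  unfold Spec_normalize_blocked_by_py normalize_blocked_by_py normalize_blocked_by_py_alt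
  rw [nbb_outer, nbb_fold_eq_loop]
  simp
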